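-- pv_equiv track=rewrite | github.com/jerol2k3/bullsAndCows | bullsAndCows/views.py | cows_
-- ===== SOURCE A (Python) =====
-- def cows_(a, b):
--     c = 0
--     a_app = {}
--     for i in a:
--         if not i in a_app:
--             a_app[i] = 0
--         a_app[i] += 1
--     for i in b:
--         if i in a_app and a_app[i] > 0:
--             a_app[i] -= 1
--             c += 1
--     return c
-- ===== SOURCE B (Python) =====
-- def cows_(a, b):
--     ca = {}
--     for x in a:
--         ca[x] = ca.get(x, 0) + 1
--     cb = {}
--     for x in b:
--         cb[x] = cb.get(x, 0) + 1
--     return sum(min(n, cb.get(k, 0)) for k, n in ca.items())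
-- ===== Notes on version B (the rewrite author's own statement) =====
-- stated objective: alternative
-- what changed: A's order-sensitive decrement-on-match scan of b against a single mutable counter is replaced by building an independent frequency table for each list and summing the per-key minima over the keys of a's table (a symmetric histogram intersection).
import Mathlib
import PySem

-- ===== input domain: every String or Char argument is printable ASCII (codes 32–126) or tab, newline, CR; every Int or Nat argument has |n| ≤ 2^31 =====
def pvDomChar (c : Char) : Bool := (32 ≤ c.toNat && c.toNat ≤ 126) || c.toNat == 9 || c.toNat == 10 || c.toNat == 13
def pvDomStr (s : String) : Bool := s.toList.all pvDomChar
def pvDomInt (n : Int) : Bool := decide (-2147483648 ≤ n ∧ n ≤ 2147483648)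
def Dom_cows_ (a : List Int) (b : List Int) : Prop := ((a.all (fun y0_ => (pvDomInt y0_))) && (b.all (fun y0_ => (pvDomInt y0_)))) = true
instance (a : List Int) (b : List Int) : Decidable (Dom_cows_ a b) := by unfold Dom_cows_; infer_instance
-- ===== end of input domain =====

-- B replaces A's decrementing single-counter scan of b by two independent frequency
-- tables combined with a per-key minimum (alternative decomposition, same cost).

-- ===== PORT A =====
def cows_ (a : List Int) (b : List Int) : Int :=
  let a_app : PySem.Dict Int Int :=
    a.foldl (fun d i =>
      let d := if d.contains i then d else d.insert i 0
      d.modify i 0 (· + 1)) PySem.Dict.empty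
  let s := b.foldl (fun (st : PySem.Dict Int Int × Int) i =>
      if st.1.contains i && decide (0 < st.1.getD i 0) then
        (st.1.modify i 0 (· - 1), st.2 + 1)
      else st) (a_app, 0)
  s.2

-- ===== PORT B =====
def cows__alt (a : List Int) (b : List Int) : Int :=
  let ca : PySem.Dict Int Int :=
    a.foldl (fun d x => d.insert x (d.getD x 0 + 1)) PySem.Dict.empty
  let cb : PySem.Dict Int Int :=
    b.foldl (fun d x => d.insert x (d.getD x 0 + 1)) PySem.Dict.empty
  (ca.items.map (fun p => min p.2 (cb.getD p.1 0))).sum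

-- ===== PRECONDITION & SPEC =====
def Spec_cows_ (a : List Int) (b : List Int) (out : Int) : Prop := out = cows__alt a b
instance (a : List Int) (b : List Int) (out : Int) : Decidable (Spec_cows_ a b out) := by unfold Spec_cows_; infer_instance

-- ===== CLAIM (what is proved, stated in full; the proofs are below) =====
def Claim_equal_cows_ : Prop := ∀ (a : List Int) (b : List Int), Dom_cows_ a b → Spec_cows_ a b (cows_ a b)

-- ===== LEMMAS AND PROOFS =====

-- functional model of A's second loop: decrement-on-match over a count function
def pvF (m : Int → Int) : List Int → Int
  | [] => 0
  | i :: b => if 0 < m i then 1 + pvF (Function.update m i (m i - 1)) b else pvF m b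

-- A's first loop builds exactly the multiplicity table of a
lemma buildA_getD (a : List Int) (d : PySem.Dict Int Int) (k : Int) :
    ((a.foldl (fun d i =>
        let d := if d.contains i then d else d.insert i 0
        d.modify i 0 (· + 1)) d).getD k 0)
      = d.getD k 0 + a.count k := by
  induction a generalizing d with
  | nil => simp
  | cons i a ih =>
    simp only [List.foldl_cons, ih]
    by_cases hc : d.contains i = true
    · simp only [hc, if_true, PySem.Dict.getD_modify]
      rcases eq_or_ne k i with rfl | hne
      · simp only [if_pos rfl, List.count_cons_self]
        push_cast; omega
      · simp [List.count_cons, hne, Ne.symm hne]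
    · simp only [hc, Bool.false_eq_true, if_false, PySem.Dict.getD_modify, PySem.Dict.getD_insert]
      rcases eq_or_ne k i with rfl | hne
      · rw [PySem.Dict.getD_of_not_contains d 0 (by simpa using hc)]
        simp [List.count_cons_self]
        all_goals omega
      · simp [List.count_cons, hne, Ne.symm hne]

-- A's second loop computes pvF of the table's count function
lemma loopA_eq_pvF (b : List Int) (d : PySem.Dict Int Int) (c : Int) :
    (b.foldl (fun (st : PySem.Dict Int Int × Int) i =>
        if st.1.contains i && decide (0 < st.1.getD i 0) then
          (st.1.modify i 0 (· - 1), st.2 + 1)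
        else st) (d, c)).2
      = c + pvF (fun k => d.getD k 0) b := by
  induction b generalizing d c with
  | nil => simp [pvF]
  | cons i b ih =>
    simp only [List.foldl_cons]
    by_cases hpos : 0 < d.getD i 0
    · have hc : d.contains i = true := by
        by_contra h
        have := PySem.Dict.getD_of_not_contains d (k := i) 0 (by simpa using h)
        omega
      rw [if_pos (by simp [hc, hpos]), ih]
      have hupd : (fun k => (d.modify i 0 (· - 1)).getD k 0)
          = Function.update (fun k => d.getD k 0) i (d.getD i 0 - 1) := by
        funext k
        rcases eq_or_ne k i with rfl | hne
        · simp [PySem.Dict.getD_modify]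
        · simp [PySem.Dict.getD_modify, if_neg hne, Function.update_of_ne hne]
      simp only [pvF]
      rw [if_pos hpos, hupd]
      ring
    · rw [if_neg (by simp [hpos]), ih]
      simp only [pvF]
      rw [if_neg hpos]

-- pvF over nonnegative counts is the per-key minimum with b's multiplicities
lemma pvF_eq_sum (b : List Int) (m : Int → Int) (hm : ∀ k, 0 ≤ m k) :
    pvF m b = ∑ k ∈ b.toFinset, min (m k) (b.count k : Int) := by
  induction b generalizing m with
  | nil => simp [pvF]
  | cons i b ih =>
    simp only [pvF, List.toFinset_cons]
    by_cases hpos : 0 < m i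
    · rw [if_pos hpos, ih _ (by
        intro k
        rcases eq_or_ne k i with rfl | hne
        · simp [Function.update_self]; omega
        · simp [Function.update_of_ne hne]; exact hm k)]
      by_cases hib : i ∈ b.toFinset
      · rw [Finset.insert_eq_self.2 hib]
        rw [← Finset.add_sum_erase _ _ hib, ← Finset.add_sum_erase _ _ hib]
        have hterms : ∑ k ∈ b.toFinset.erase i, min (Function.update m i (m i - 1) k) (b.count k : Int)
            = ∑ k ∈ b.toFinset.erase i, min (m k) ((i :: b).count k : Int) := by
          apply Finset.sum_congr rfl
          intro k hk
          have hne : k ≠ i := Finset.ne_of_mem_erase hk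
          simp [Function.update_of_ne hne, List.count_cons, Ne.symm hne]
        rw [hterms, Function.update_self, List.count_cons_self]
        push_cast
        omega
      · rw [Finset.sum_insert hib]
        have hcnt : b.count i = 0 := List.count_eq_zero.2 (by simpa using hib)
        have hterms : ∑ k ∈ b.toFinset, min (Function.update m i (m i - 1) k) (b.count k : Int)
            = ∑ k ∈ b.toFinset, min (m k) ((i :: b).count k : Int) := by
          apply Finset.sum_congr rfl
          intro k hk
          have hne : k ≠ i := by rintro rfl; exact hib hk
          simp [Function.update_of_ne hne, List.count_cons, Ne.symm hne]
        rw [hterms, List.count_cons_self, hcnt]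
        push_cast
        omega
    · have hz : m i = 0 := le_antisymm (not_lt.1 hpos) (hm i)
      rw [if_neg hpos, ih m hm]
      by_cases hib : i ∈ b.toFinset
      · rw [Finset.insert_eq_self.2 hib]
        apply Finset.sum_congr rfl
        intro k hk
        rcases eq_or_ne k i with rfl | hne
        · rw [hz]; omega
        · simp [List.count_cons, Ne.symm hne]
      · rw [Finset.sum_insert hib]
        have hcnt : b.count i = 0 := List.count_eq_zero.2 (by simpa using hib)
        have hsum : ∑ k ∈ b.toFinset, min (m k) (((i :: b).count k : Nat) : Int)
            = ∑ k ∈ b.toFinset, min (m k) (b.count k : Int) := by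
          apply Finset.sum_congr rfl
          intro k hk
          have hne : k ≠ i := by rintro rfl; exact hib hk
          simp [List.count_cons, Ne.symm hne]
        rw [hsum, List.count_cons_self, hcnt, hz]
        simp

lemma cows_eq_sum (a b : List Int) :
    cows_ a b = ∑ k ∈ b.toFinset, min (a.count k : Int) (b.count k : Int) := by
  simp only [cows_]
  rw [loopA_eq_pvF]
  rw [pvF_eq_sum _ _ (fun k => by rw [buildA_getD]; simp)]
  simp only [zero_add]
  apply Finset.sum_congr rfl
  intro k _
  rw [buildA_getD]
  simp

lemma cows_alt_eq_sum (a b : List Int) :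
    cows__alt a b = ∑ k ∈ a.toFinset, min (a.count k : Int) (b.count k : Int) := by
  simp only [cows__alt, PySem.Dict.foldl_insert_getD_add_one_eq_counter,
    PySem.Dict.items_counter, List.map_map]
  have h : ((PySem.Set.ofList a).map
        ((fun p => min p.2 ((PySem.Dict.counter b).getD p.1 0)) ∘ fun k => (k, (a.count k : Int)))).sum
      = ∑ k ∈ a.toFinset, min (a.count k : Int) (b.count k : Int) := by
    rw [← List.sum_toFinset _ (PySem.Set.nodup_ofList a)]
    apply Finset.sum_congr
    · ext k
      simp [PySem.Set.mem_ofList]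
    · intro k _
      simp [PySem.Dict.getD_counter]
  exact h

-- ===== VERDICT (by name: the statement is the Claim_ definition above) =====
theorem cows__spec : Claim_equal_cows_ := by
  intro a b _
  unfold Spec_cows_
  rw [cows_eq_sum, cows_alt_eq_sum]
  have h1 : ∑ k ∈ b.toFinset, min (a.count k : Int) (b.count k : Int)
      = ∑ k ∈ a.toFinset ∪ b.toFinset, min (a.count k : Int) (b.count k : Int) := by
    apply Finset.sum_subset Finset.subset_union_right
    intro k _ hk
    have hb : b.count k = 0 := List.count_eq_zero.2 (by simpa using hk)
    rw [hb]
    omega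
  have h2 : ∑ k ∈ a.toFinset, min (a.count k : Int) (b.count k : Int)
      = ∑ k ∈ a.toFinset ∪ b.toFinset, min (a.count k : Int) (b.count k : Int) := by
    apply Finset.sum_subset Finset.subset_union_left
    intro k _ hk
    have ha : a.count k = 0 := List.count_eq_zero.2 (by simpa using hk)
    rw [ha]
    omega
  rw [h1, h2]
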